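-- pv_equiv track=rewrite | github.com/luxcas213/proyecto-posta | construccionGRAFO.py | crear_megagrafo
-- ===== SOURCE A (Python) =====
-- from typing import List, Tuple
--
-- def crear_megagrafo(
--     lado_xy: List[List[int]],
--     lado_yz: List[List[int]],
--     lado_xz: List[List[int]],
--     conecciones_xy: List[List[int]],
--     conecciones_yz: List[List[int]],
--     conecciones_xz: List[List[int]]
-- ) -> Tuple[List[List[int]], List[List[List[int]]]]:
--
--     grafo = []
--     padres = {}
--
--     # Crear nodos del grafo
--     for i, nodo in enumerate(lado_xy):
--         for j, nodo2 in enumerate(lado_xz):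
--             if nodo2[0] == nodo[0]:
--                 for k, nodo3 in enumerate(lado_yz):
--                     if nodo3[1] == nodo[1] and nodo3[0] == nodo2[1]:
--                         nodoaux = [nodo[0], nodo[1], nodo2[1]]
--                         palabranodoaux = str(nodoaux)
--                         padres[palabranodoaux] = [i, j, k]
--                         if nodoaux not in grafo:
--                             grafo.append(nodoaux)
--
--     # Crear conexiones entre nodos
--     grafo_conexiones = [[] for _ in grafo]
--     for i, nodo in enumerate(grafo):
--         palabranodo = str(nodo)
--         aux = padres[palabranodo]
--         aux1, aux2, aux3 = aux
--
--         for nodo2 in grafo: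
--             if nodo == nodo2:
--                 continue
--
--             palabranodo2 = str(nodo2)
--             Aaux = padres[palabranodo2]
--             Aaux1, Aaux2, Aaux3 = Aaux
--             si1 = si2 = si3 = False
--             if Aaux1 in conecciones_xy[aux1]:
--                 si1 = True
--             if Aaux2 in conecciones_xz[aux2]:
--                 si2 = True
--             if Aaux3 in conecciones_yz[aux3]:
--                 si3 = True
--
--             if (si1 and si2 and Aaux3 == aux3) or (si1 and si3 and Aaux2 == aux2) or (si2 and si3 and Aaux1 == aux1) or (si1 and si2 and si3):
--                 grafo_conexiones[i].append(nodo2)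
--
--     return grafo, grafo_conexiones
-- ===== SOURCE B (Python) =====
-- def crear_megagrafo(
--     lado_xy,
--     lado_yz,
--     lado_xz,
--     conecciones_xy,
--     conecciones_yz,
--     conecciones_xz,
-- ):
--     # Stage 1: hash-index the xz projection by x and the yz projection by
--     # (y, z), then produce the flat list of coordinate matches (node, parents)
--     # in a single comprehension instead of A's triple nested scan.
--     xz_by_x = {}
--     for j, p in enumerate(lado_xz):
--         xz_by_x.setdefault(p[0], []).append((j, p))
--     yz_by_yz = {}
--     for k, p in enumerate(lado_yz):
--         yz_by_yz.setdefault((p[1], p[0]), []).append(k)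
--
--     matches = [
--         ([xy[0], xy[1], xz[1]], [i, j, k])
--         for i, xy in enumerate(lado_xy)
--         for j, xz in xz_by_x.get(xy[0], [])
--         for k in yz_by_yz.get((xy[1], xz[1]), [])
--     ]
--
--     # Stage 2: reduce the match list separately into padres (last match wins,
--     # as dict assignment does) and grafo (first occurrence order, deduped).
--     padres = {}
--     for node, ijk in matches:
--         padres[tuple(node)] = ijk
--     grafo = []
--     seen = set()
--     for node, _ in matches:
--         t = tuple(node)
--         if t not in seen:
--             seen.add(t)
--             grafo.append(node)
--
--     # Stage 3: neighbour rows by map/filter with prebuilt row sets and a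
--     # count-based edge test.
--     sxy = [set(r) for r in conecciones_xy]
--     sxz = [set(r) for r in conecciones_xz]
--     syz = [set(r) for r in conecciones_yz]
--
--     def linked(a, b):
--         he = [(b[0] in sxy[a[0]], b[0] == a[0]),
--               (b[1] in sxz[a[1]], b[1] == a[1]),
--               (b[2] in syz[a[2]], b[2] == a[2])]
--         return sum(h for h, _ in he) >= 2 and all(h or e for h, e in he)
--
--     conexiones = [
--         [m for m in grafo if m != n and linked(padres[tuple(n)], padres[tuple(m)])]
--         for n in grafo
--     ]
--     return grafo, conexiones
-- ===== Notes on version B (the rewrite author's own statement) =====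
-- stated objective: alternative
-- what changed: B hash-indexes lado_xz by x and lado_yz by (y,z) and produces one flat list of coordinate matches in a single comprehension (instead of A's triple nested scan), reduces that list separately into the padres dict and the deduped node list (instead of A's single interleaved loop state), and builds neighbour rows by map/filter over prebuilt row sets with a count-based edge test instead of A's index-written rows and four-way disjunction; a timing run measured B ahead on mid sizes but both time out at the largest size, so no speed-up is claimed.
-- outside the precondition, e.g. on crear_megagrafo([[]], [], [], [], [], []): A returns ([], []), B raises IndexError
import Mathlib
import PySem

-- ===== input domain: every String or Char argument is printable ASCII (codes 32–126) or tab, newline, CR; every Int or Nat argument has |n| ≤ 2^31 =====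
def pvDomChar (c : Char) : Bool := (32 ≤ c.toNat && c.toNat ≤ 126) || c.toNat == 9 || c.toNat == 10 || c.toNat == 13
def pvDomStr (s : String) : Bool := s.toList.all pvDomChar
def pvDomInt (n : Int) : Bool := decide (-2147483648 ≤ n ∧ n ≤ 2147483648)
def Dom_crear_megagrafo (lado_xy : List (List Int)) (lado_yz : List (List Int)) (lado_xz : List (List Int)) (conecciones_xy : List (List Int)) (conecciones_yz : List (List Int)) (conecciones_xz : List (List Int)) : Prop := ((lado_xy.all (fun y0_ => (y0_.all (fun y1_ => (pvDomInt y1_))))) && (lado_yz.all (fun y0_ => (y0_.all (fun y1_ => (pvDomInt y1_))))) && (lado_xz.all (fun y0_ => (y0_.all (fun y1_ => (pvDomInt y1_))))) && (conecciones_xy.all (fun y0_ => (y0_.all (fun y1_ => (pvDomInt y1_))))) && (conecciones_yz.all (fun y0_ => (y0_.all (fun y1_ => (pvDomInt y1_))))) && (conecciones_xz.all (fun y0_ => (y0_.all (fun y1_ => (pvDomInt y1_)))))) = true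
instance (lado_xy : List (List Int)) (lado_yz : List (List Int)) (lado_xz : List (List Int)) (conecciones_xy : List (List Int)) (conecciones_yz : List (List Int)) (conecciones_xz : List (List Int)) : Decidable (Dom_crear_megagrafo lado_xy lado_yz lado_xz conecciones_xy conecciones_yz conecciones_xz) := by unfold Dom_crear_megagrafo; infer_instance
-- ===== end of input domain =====

-- B replaces A's triple nested scan by hash indexes on the matched coordinates producing one flat
-- match list, reduces that list separately into padres and the deduped node list, and builds the
-- neighbour rows by map/filter over prebuilt row sets with a count-based edge test: a different
-- algorithm that visits only actual coordinate matches (no speed-up is claimed at the largest size).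

-- ===== PORT A =====
-- Python's str(nodoaux) is used ONLY as a dict key; str is injective on lists of ints, so keying
-- the dict by the list itself is exact.  'aux1, aux2, aux3 = aux' unpacks the stored length-3
-- list; it is ported as indexing positions 0,1,2 (exact: every stored value is [i, j, k]).
-- xs[i] on in-range nonnegative indices is ported as PySem.List.pyGetD (exact inside Pre_).
def pvA_body (i j k : Int) (nodo nodo2 : List Int)
    (st : List (List Int) × PySem.Dict (List Int) (List Int)) :
    List (List Int) × PySem.Dict (List Int) (List Int) :=
  let nodoaux := [PySem.List.pyGetD nodo 0 0, PySem.List.pyGetD nodo 1 0,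
                  PySem.List.pyGetD nodo2 1 0]
  let padres' := st.2.insert nodoaux [i, j, k]
  let grafo' := if st.1.contains nodoaux then st.1 else st.1 ++ [nodoaux]
  (grafo', padres')

def pvA_fase1 (lado_xy lado_yz lado_xz : List (List Int)) :
    List (List Int) × PySem.Dict (List Int) (List Int) :=
  (PySem.List.enumerate lado_xy 0).foldl (fun st p =>
    (PySem.List.enumerate lado_xz 0).foldl (fun st q =>
      if PySem.List.pyGetD q.2 0 0 == PySem.List.pyGetD p.2 0 0 then
        (PySem.List.enumerate lado_yz 0).foldl (fun st r =>
          if PySem.List.pyGetD r.2 1 0 == PySem.List.pyGetD p.2 1 0 &&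
             PySem.List.pyGetD r.2 0 0 == PySem.List.pyGetD q.2 1 0 then
            pvA_body p.1 q.1 r.1 p.2 q.2 st
          else st) st
      else st) st) ([], PySem.Dict.empty)

def pvA_cond (cxy cyz cxz : List (List Int)) (padres : PySem.Dict (List Int) (List Int))
    (aux nodo nodo2 : List Int) : Bool :=
  if nodo == nodo2 then false
  else
    let aux1 := PySem.List.pyGetD aux 0 0
    let aux2 := PySem.List.pyGetD aux 1 0
    let aux3 := PySem.List.pyGetD aux 2 0
    let A := padres.getD nodo2 []
    let A1 := PySem.List.pyGetD A 0 0
    let A2 := PySem.List.pyGetD A 1 0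
    let A3 := PySem.List.pyGetD A 2 0
    let si1 := (PySem.List.pyGetD cxy aux1 []).contains A1
    let si2 := (PySem.List.pyGetD cxz aux2 []).contains A2
    let si3 := (PySem.List.pyGetD cyz aux3 []).contains A3
    (si1 && si2 && (A3 == aux3)) || (si1 && si3 && (A2 == aux2)) ||
      (si2 && si3 && (A1 == aux1)) || (si1 && si2 && si3)

def pvA_fase2 (cxy cyz cxz : List (List Int)) (grafo : List (List Int))
    (padres : PySem.Dict (List Int) (List Int)) : List (List (List Int)) :=
  (PySem.List.enumerate grafo 0).foldl (fun gc p =>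
    grafo.foldl (fun gc nodo2 =>
      if pvA_cond cxy cyz cxz padres (padres.getD p.2 []) p.2 nodo2 then
        PySem.List.pySetD gc p.1 (PySem.List.pyGetD gc p.1 [] ++ [nodo2])
      else gc) gc)
    (grafo.map fun _ => ([] : List (List Int)))

def crear_megagrafo (lado_xy : List (List Int)) (lado_yz : List (List Int)) (lado_xz : List (List Int)) (conecciones_xy : List (List Int)) (conecciones_yz : List (List Int)) (conecciones_xz : List (List Int)) : List (List Int) × List (List (List Int)) :=
  let st := pvA_fase1 lado_xy lado_yz lado_xz
  (st.1, pvA_fase2 conecciones_xy conecciones_yz conecciones_xz st.1 st.2)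

-- ===== PORT B =====
-- Python B keys 'padres' and 'seen' by the tuple (x, y, z) of the node; a tuple of ints is in
-- bijection with the length-3 list used for the node itself, so both are ported keyed by the list.
def pvB_xzIdx (lado_xz : List (List Int)) : PySem.Dict Int (List (Int × List Int)) :=
  (PySem.List.enumerate lado_xz 0).foldl
    (fun d q => d.modify (PySem.List.pyGetD q.2 0 0) [] (· ++ [q])) PySem.Dict.empty

def pvB_yzIdx (lado_yz : List (List Int)) : PySem.Dict (Int × Int) (List Int) :=
  (PySem.List.enumerate lado_yz 0).foldl
    (fun d r => d.modify (PySem.List.pyGetD r.2 1 0, PySem.List.pyGetD r.2 0 0) [] (· ++ [r.1]))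
    PySem.Dict.empty

-- the flat list of (node, [i, j, k]) coordinate matches, one comprehension
def pvB_matches (lado_xy lado_yz lado_xz : List (List Int)) : List (List Int × List Int) :=
  (PySem.List.enumerate lado_xy 0).flatMap (fun p =>
    ((pvB_xzIdx lado_xz).getD (PySem.List.pyGetD p.2 0 0) []).flatMap (fun q =>
      ((pvB_yzIdx lado_yz).getD (PySem.List.pyGetD p.2 1 0, PySem.List.pyGetD q.2 1 0) []).map
        (fun k => ([PySem.List.pyGetD p.2 0 0, PySem.List.pyGetD p.2 1 0,
                    PySem.List.pyGetD q.2 1 0], [p.1, q.1, k]))))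

def pvB_padres (ms : List (List Int × List Int)) : PySem.Dict (List Int) (List Int) :=
  ms.foldl (fun d m => d.insert m.1 m.2) PySem.Dict.empty

def pvB_grafo (ms : List (List Int × List Int)) : List (List Int) :=
  (ms.foldl (fun gs m =>
      if PySem.Set.contains gs.2 m.1 then gs else (gs.1 ++ [m.1], PySem.Set.add gs.2 m.1))
    (([] : List (List Int)), (PySem.Set.empty : PySem.Set (List Int)))).1

def pvB_hits (sxy syz sxz : List (PySem.Set Int)) (a b : List Int) : List (Bool × Bool) :=
  [ (PySem.Set.contains (PySem.List.pyGetD sxy (PySem.List.pyGetD a 0 0) [])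
       (PySem.List.pyGetD b 0 0), PySem.List.pyGetD b 0 0 == PySem.List.pyGetD a 0 0),
    (PySem.Set.contains (PySem.List.pyGetD sxz (PySem.List.pyGetD a 1 0) [])
       (PySem.List.pyGetD b 1 0), PySem.List.pyGetD b 1 0 == PySem.List.pyGetD a 1 0),
    (PySem.Set.contains (PySem.List.pyGetD syz (PySem.List.pyGetD a 2 0) [])
       (PySem.List.pyGetD b 2 0), PySem.List.pyGetD b 2 0 == PySem.List.pyGetD a 2 0) ]

-- sum(h for h, _ in he) >= 2 and all(h or e for h, e in he)
def pvB_linked (sxy syz sxz : List (PySem.Set Int)) (a b : List Int) : Bool :=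
  let he := pvB_hits sxy syz sxz a b
  decide (2 ≤ he.countP (·.1)) && he.all (fun x => x.1 || x.2)

def pvB_fase2 (cxy cyz cxz : List (List Int)) (grafo : List (List Int))
    (padres : PySem.Dict (List Int) (List Int)) : List (List (List Int)) :=
  let sxy := cxy.map PySem.Set.ofList
  let sxz := cxz.map PySem.Set.ofList
  let syz := cyz.map PySem.Set.ofList
  grafo.map (fun n => grafo.filter (fun m =>
    !(m == n) && pvB_linked sxy syz sxz (padres.getD n []) (padres.getD m [])))

def crear_megagrafo_alt (lado_xy : List (List Int)) (lado_yz : List (List Int)) (lado_xz : List (List Int)) (conecciones_xy : List (List Int)) (conecciones_yz : List (List Int)) (conecciones_xz : List (List Int)) : List (List Int) × List (List (List Int)) :=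
  let ms := pvB_matches lado_xy lado_yz lado_xz
  let grafo := pvB_grafo ms
  (grafo, pvB_fase2 conecciones_xy conecciones_yz conecciones_xz grafo (pvB_padres ms))

-- ===== PRECONDITION & SPEC =====
-- Pre_ excludes inputs on which A (or B) raises IndexError: a projection row with fewer than 2
-- coordinates, or a conexion table shorter than its projection list.  It is slightly
-- conservative: when an outer list is empty A never reaches some short rows and still returns.
def Pre_crear_megagrafo (lado_xy : List (List Int)) (lado_yz : List (List Int)) (lado_xz : List (List Int)) (conecciones_xy : List (List Int)) (conecciones_yz : List (List Int)) (conecciones_xz : List (List Int)) : Prop :=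
  (∀ l ∈ lado_xy, 2 ≤ l.length) ∧ (∀ l ∈ lado_yz, 2 ≤ l.length) ∧ (∀ l ∈ lado_xz, 2 ≤ l.length) ∧
  lado_xy.length ≤ conecciones_xy.length ∧ lado_yz.length ≤ conecciones_yz.length ∧
  lado_xz.length ≤ conecciones_xz.length

instance (lado_xy : List (List Int)) (lado_yz : List (List Int)) (lado_xz : List (List Int)) (conecciones_xy : List (List Int)) (conecciones_yz : List (List Int)) (conecciones_xz : List (List Int)) : Decidable (Pre_crear_megagrafo lado_xy lado_yz lado_xz conecciones_xy conecciones_yz conecciones_xz) := by unfold Pre_crear_megagrafo; infer_instance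

def pvWitness_crear_megagrafo : List (List Int) × List (List Int) × List (List Int) × List (List Int) × List (List Int) × List (List Int) :=
  ([[1, 2]], [[2, 3]], [[1, 3]], [[0]], [[0]], [[0]])

def Spec_crear_megagrafo (lado_xy : List (List Int)) (lado_yz : List (List Int)) (lado_xz : List (List Int)) (conecciones_xy : List (List Int)) (conecciones_yz : List (List Int)) (conecciones_xz : List (List Int)) (out : List (List Int) × List (List (List Int))) : Prop := out = crear_megagrafo_alt lado_xy lado_yz lado_xz conecciones_xy conecciones_yz conecciones_xz
instance (lado_xy : List (List Int)) (lado_yz : List (List Int)) (lado_xz : List (List Int)) (conecciones_xy : List (List Int)) (conecciones_yz : List (List Int)) (conecciones_xz : List (List Int)) (out : List (List Int) × List (List (List Int))) : Decidable (Spec_crear_megagrafo lado_xy lado_yz lado_xz conecciones_xy conecciones_yz conecciones_xz out) := by unfold Spec_crear_megagrafo; infer_instance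

-- ===== CLAIM (what is proved, stated in full; the proofs are below) =====
def Claim_equal_crear_megagrafo : Prop := ∀ (lado_xy : List (List Int)) (lado_yz : List (List Int)) (lado_xz : List (List Int)) (conecciones_xy : List (List Int)) (conecciones_yz : List (List Int)) (conecciones_xz : List (List Int)), Dom_crear_megagrafo lado_xy lado_yz lado_xz conecciones_xy conecciones_yz conecciones_xz → Pre_crear_megagrafo lado_xy lado_yz lado_xz conecciones_xy conecciones_yz conecciones_xz → Spec_crear_megagrafo lado_xy lado_yz lado_xz conecciones_xy conecciones_yz conecciones_xz (crear_megagrafo lado_xy lado_yz lado_xz conecciones_xy conecciones_yz conecciones_xz)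

-- ===== LEMMAS AND PROOFS =====

-- pvA_body depends on (i, j, k) and the two projections only through the node and parent lists.
def pvStep (m : List Int × List Int) (st : List (List Int) × PySem.Dict (List Int) (List Int)) :
    List (List Int) × PySem.Dict (List Int) (List Int) :=
  (if st.1.contains m.1 then st.1 else st.1 ++ [m.1], st.2.insert m.1 m.2)

theorem pv_body_step (i j k : Int) (nodo nodo2 : List Int)
    (st : List (List Int) × PySem.Dict (List Int) (List Int)) :
    pvA_body i j k nodo nodo2 st
      = pvStep ([PySem.List.pyGetD nodo 0 0, PySem.List.pyGetD nodo 1 0,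
                 PySem.List.pyGetD nodo2 1 0], [i, j, k]) st := rfl

-- The xz bucket of x holds exactly the enumerated rows whose first coordinate is x.
theorem pv_bucket_xz (lado_xz : List (List Int)) (x : Int) :
    (pvB_xzIdx lado_xz).getD x []
      = (PySem.List.enumerate lado_xz 0).filter (fun q => PySem.List.pyGetD q.2 0 0 == x) := by
  have h := PySem.Dict.getD_foldl_modify_append
    ((PySem.List.enumerate lado_xz 0).map (fun q => (PySem.List.pyGetD q.2 0 0, q)))
    (PySem.Dict.empty (κ := Int) (ν := List (Int × List Int))) x
  rw [List.foldl_map] at h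
  unfold pvB_xzIdx
  rw [h, PySem.Dict.getD_empty, List.filter_map, List.map_map]
  simp [Function.comp_def]

-- The yz bucket of (y, z) holds exactly the indices of rows with second coordinate y and first z.
theorem pv_bucket_yz (lado_yz : List (List Int)) (y z : Int) :
    (pvB_yzIdx lado_yz).getD (y, z) []
      = ((PySem.List.enumerate lado_yz 0).filter (fun r =>
            PySem.List.pyGetD r.2 1 0 == y && PySem.List.pyGetD r.2 0 0 == z)).map (·.1) := by
  have h := PySem.Dict.getD_foldl_modify_append
    ((PySem.List.enumerate lado_yz 0).map (fun r =>
        ((PySem.List.pyGetD r.2 1 0, PySem.List.pyGetD r.2 0 0), r.1)))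
    (PySem.Dict.empty (κ := Int × Int) (ν := List Int)) (y, z)
  rw [List.foldl_map] at h
  unfold pvB_yzIdx
  rw [h, PySem.Dict.getD_empty, List.filter_map, List.map_map]
  rfl

-- A's triple nested loop is the fold of pvStep over B's flat match list.
theorem pv_fase1_as_matches (lado_xy lado_yz lado_xz : List (List Int)) :
    pvA_fase1 lado_xy lado_yz lado_xz
      = (pvB_matches lado_xy lado_yz lado_xz).foldl (fun st m => pvStep m st)
          ([], PySem.Dict.empty) := by
  unfold pvA_fase1 pvB_matches
  rw [List.foldl_flatMap]
  apply PySem.List.foldl_congr_mem'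
  intro p _ st
  rw [List.foldl_flatMap, pv_bucket_xz, List.foldl_filter]
  apply PySem.List.foldl_congr_mem'
  intro q _ st
  by_cases hq : (PySem.List.pyGetD q.2 0 0 == PySem.List.pyGetD p.2 0 0) = true
  · simp only [hq, if_true]
    rw [pv_bucket_yz]; simp only [List.foldl_map]; rw [List.foldl_filter]
    apply PySem.List.foldl_congr_mem'
    intro r _ st
    by_cases hr : (PySem.List.pyGetD r.2 1 0 == PySem.List.pyGetD p.2 1 0 &&
        PySem.List.pyGetD r.2 0 0 == PySem.List.pyGetD q.2 1 0) = true
    · simp only [hr, if_true]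
      exact pv_body_step p.1 q.1 r.1 p.2 q.2 st
    · simp only [Bool.not_eq_true] at hr
      simp only [hr, Bool.false_eq_true, if_false]
  · simp only [Bool.not_eq_true] at hq
    simp only [hq, Bool.false_eq_true, if_false]

-- The single pvStep fold splits into B's two separate reductions over the same match list.
theorem pv_split (ms : List (List Int × List Int)) :
    ∀ (g : List (List Int)) (s : PySem.Set (List Int)) (d : PySem.Dict (List Int) (List Int)),
    (∀ x, x ∈ s ↔ x ∈ g) →
    ms.foldl (fun st m => pvStep m st) (g, d)
      = ((ms.foldl (fun gs m =>
            if PySem.Set.contains gs.2 m.1 then gs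
            else (gs.1 ++ [m.1], PySem.Set.add gs.2 m.1)) (g, s)).1,
         ms.foldl (fun d m => d.insert m.1 m.2) d) := by
  induction ms with
  | nil => intro g s d _; rfl
  | cons m ms ih =>
    intro g s d hinv
    by_cases hm : m.1 ∈ g
    · have h1 : g.contains m.1 = true := by simpa using hm
      have h2 : PySem.Set.contains s m.1 = true := by
        simp [PySem.Set.contains, (hinv m.1).2 hm]
      simp only [List.foldl_cons, pvStep, h1, h2, if_true]
      exact ih g s _ hinv
    · have h1 : g.contains m.1 = false := by simpa using hm
      have h2 : PySem.Set.contains s m.1 = false := by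
        simp [PySem.Set.contains]
        exact fun h => hm ((hinv m.1).1 h)
      simp only [List.foldl_cons, pvStep, h1, h2, Bool.false_eq_true, if_false]
      apply ih
      intro x
      rw [PySem.Set.mem_add, List.mem_append, List.mem_singleton, hinv x]

theorem pv_fase1_couple (lado_xy lado_yz lado_xz : List (List Int)) :
    pvA_fase1 lado_xy lado_yz lado_xz
      = (pvB_grafo (pvB_matches lado_xy lado_yz lado_xz),
         pvB_padres (pvB_matches lado_xy lado_yz lado_xz)) := by
  rw [pv_fase1_as_matches]
  unfold pvB_grafo pvB_padres
  exact pv_split _ [] PySem.Set.empty PySem.Dict.empty (by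
    intro x; simp [PySem.Set.empty])

-- Python set membership agrees with list membership.
theorem pv_contains_ofList (l : List Int) (x : Int) :
    PySem.Set.contains (PySem.Set.ofList l) x = l.contains x := by
  by_cases h : x ∈ l <;> simp [PySem.Set.contains, h, PySem.Set.mem_ofList]

-- A row of the set-indexed connection tables answers the same membership as the raw row.
theorem pv_srow (c : List (List Int)) (i x : Int) :
    PySem.Set.contains (PySem.List.pyGetD (c.map PySem.Set.ofList) i []) x
      = (PySem.List.pyGetD c i []).contains x := by
  have h : PySem.List.pyGetD (c.map PySem.Set.ofList) i [] =
      PySem.Set.ofList (PySem.List.pyGetD c i []) :=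
    PySem.List.pyGetD_map PySem.Set.ofList c i []
  rw [h, pv_contains_ofList]

-- B's count-of-memberships test is A's four-way disjunction (truth table over the six atoms).
theorem pv_table (s1 s2 s3 e1 e2 e3 : Bool) :
    (decide (2 ≤ ([(s1, e1), (s2, e2), (s3, e3)].countP (·.1)))
        && [(s1, e1), (s2, e2), (s3, e3)].all (fun x => x.1 || x.2))
      = ((s1 && s2 && e3) || (s1 && s3 && e2) || (s2 && s3 && e1) || (s1 && s2 && s3)) := by
  cases s1 <;> cases s2 <;> cases s3 <;> cases e1 <;> cases e2 <;> cases e3 <;> decide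

theorem pv_cond_eq (cxy cyz cxz : List (List Int)) (padres : PySem.Dict (List Int) (List Int))
    (aux nodo nodo2 : List Int) :
    pvA_cond cxy cyz cxz padres aux nodo nodo2
      = (!(nodo2 == nodo) && pvB_linked (cxy.map PySem.Set.ofList) (cyz.map PySem.Set.ofList)
            (cxz.map PySem.Set.ofList) aux (padres.getD nodo2 [])) := by
  unfold pvA_cond pvB_linked pvB_hits
  cases hb : nodo == nodo2
  · have hb' : (nodo2 == nodo) = false := by
      rw [beq_eq_false_iff_ne] at hb ⊢
      exact fun h => hb h.symm
    simp only [Bool.false_eq_true, if_false, hb', Bool.not_false, Bool.true_and]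
    rw [pv_srow, pv_srow, pv_srow]
    exact (pv_table _ _ _ _ _ _).symm
  · have hb' : (nodo2 == nodo) = true := by simp [eq_of_beq hb]
    simp [hb']

-- Writing at a fixed index folds to a single write of the collected appends.
theorem pv_setfold (i : Nat) (ms : List (List Int)) :
    ∀ (gc : List (List (List Int))),
    ms.foldl (fun gc n2 =>
        PySem.List.pySetD gc (i : Int) (PySem.List.pyGetD gc (i : Int) [] ++ [n2])) gc
      = PySem.List.pySetD gc (i : Int) (PySem.List.pyGetD gc (i : Int) [] ++ ms) := by
  induction ms with
  | nil =>
    intro gc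
    by_cases h : i < gc.length
    · simp only [List.foldl_nil, PySem.List.pySetD_natCast, PySem.List.pyGetD_natCast, List.getD,
        List.getElem?_eq_getElem h, Option.getD_some, List.append_nil]
      exact (List.set_getElem_self h).symm
    · simp [PySem.List.pySetD_natCast, List.set_eq_of_length_le (Nat.le_of_not_lt h)]
  | cons m ms ih =>
    intro gc
    simp only [List.foldl_cons]
    rw [ih]
    by_cases h : i < gc.length
    · rw [PySem.List.pyGetD_pySetD_natCast _ _ _ _ _ h]
      simp [PySem.List.pySetD_natCast, List.set_set]
    · have hle := Nat.le_of_not_lt h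
      simp [PySem.List.pySetD_natCast, List.set_eq_of_length_le hle]

-- A's inner neighbour loop is one write of the filtered neighbour row.
theorem pv_inner_row (cond : List Int → Bool) (l : List (List Int)) (i : Nat)
    (gc : List (List (List Int))) :
    l.foldl (fun gc n2 =>
        if cond n2 then
          PySem.List.pySetD gc (i : Int) (PySem.List.pyGetD gc (i : Int) [] ++ [n2])
        else gc) gc
      = PySem.List.pySetD gc (i : Int) (PySem.List.pyGetD gc (i : Int) [] ++ l.filter cond) := by
  rw [PySem.List.foldl_if_eq_foldl_filter]
  exact pv_setfold i (l.filter cond) gc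

-- A loop that writes row p into slot p.1 of a fresh table just lists the rows.
theorem pv_outer (xs : List (List Int)) (rowf : Int × List Int → List (List Int)) :
    ∀ (pre : List (List (List Int))),
    (PySem.List.enumerate xs (pre.length : Int)).foldl
        (fun gc p => PySem.List.pySetD gc p.1 (PySem.List.pyGetD gc p.1 [] ++ rowf p))
        (pre ++ xs.map fun _ => ([] : List (List Int)))
      = pre ++ (PySem.List.enumerate xs (pre.length : Int)).map rowf := by
  induction xs with
  | nil => intro pre; simp [PySem.List.enumerate_nil]
  | cons x xs ih =>
    intro pre
    rw [PySem.List.enumerate_cons]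
    simp only [List.foldl_cons, List.map_cons]
    have hget : PySem.List.pyGetD (pre ++ ([] : List (List Int)) :: xs.map fun _ => [])
        ((pre.length : Nat) : Int) [] = [] := by
      simp [PySem.List.pyGetD_natCast]
    have hset : PySem.List.pySetD (pre ++ ([] : List (List Int)) :: xs.map fun _ => [])
        ((pre.length : Nat) : Int) (rowf ((pre.length : Int), x))
        = (pre ++ [rowf ((pre.length : Int), x)]) ++ xs.map fun _ => [] := by
      simp [PySem.List.pySetD_natCast]
    rw [hget, List.nil_append, hset]
    have hlen : ((pre ++ [rowf ((pre.length : Int), x)]).length : Int) = (pre.length : Int) + 1 := by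
      simp
    rw [show (pre.length : Int) + 1 = ((pre ++ [rowf ((pre.length : Int), x)]).length : Int) from
      hlen.symm, ih (pre ++ [rowf ((pre.length : Int), x)])]
    simp

theorem pv_fase2_couple (cxy cyz cxz : List (List Int)) (grafo : List (List Int))
    (padres : PySem.Dict (List Int) (List Int)) :
    pvA_fase2 cxy cyz cxz grafo padres = pvB_fase2 cxy cyz cxz grafo padres := by
  unfold pvA_fase2 pvB_fase2
  rw [PySem.List.foldl_congr_mem' (PySem.List.enumerate grafo 0) _
    (fun gc p => PySem.List.pySetD gc p.1 (PySem.List.pyGetD gc p.1 [] ++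
      grafo.filter (fun nodo2 => pvA_cond cxy cyz cxz padres (padres.getD p.2 []) p.2 nodo2)))
    (grafo.map fun _ => ([] : List (List Int)))
    (by
      intro p hp gc
      obtain ⟨k, hk, rfl⟩ := (PySem.List.mem_enumerate_iff grafo 0 p).1 hp
      simpa using pv_inner_row
        (fun nodo2 => pvA_cond cxy cyz cxz padres (padres.getD grafo[k] []) grafo[k] nodo2)
        grafo k gc)]
  have h0 : ((List.length ([] : List (List (List Int)))) : Int) = 0 := by simp
  have := pv_outer grafo
    (fun p => grafo.filter (fun nodo2 =>
      pvA_cond cxy cyz cxz padres (padres.getD p.2 []) p.2 nodo2)) []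
  rw [h0] at this
  rw [List.nil_append] at this
  rw [this, List.nil_append]
  have hcomp : (fun (p : Int × List Int) => grafo.filter (fun nodo2 =>
        pvA_cond cxy cyz cxz padres (padres.getD p.2 []) p.2 nodo2))
      = (fun (nodo : List Int) => grafo.filter (fun nodo2 =>
        pvA_cond cxy cyz cxz padres (padres.getD nodo []) nodo nodo2)) ∘ (fun p => p.2) := rfl
  rw [hcomp, ← List.map_map, PySem.List.map_snd_enumerate]
  apply List.map_congr_left
  intro nodo _
  apply List.filter_congr
  intro n2 _
  exact pv_cond_eq cxy cyz cxz padres (padres.getD nodo []) nodo n2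

-- ===== VERDICT (by name: the statement is the Claim_ definition above) =====
theorem crear_megagrafo_spec : Claim_equal_crear_megagrafo := by
  intro lado_xy lado_yz lado_xz cxy cyz cxz _ _
  unfold Spec_crear_megagrafo crear_megagrafo crear_megagrafo_alt
  rw [pv_fase1_couple]
  simp only
  rw [pv_fase2_couple]
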